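-- pv_equiv track=rewrite | github.com/m-tobin/many-3-crystallisations | survey.py | fundamental_group
-- ===== SOURCE A (Python) =====
-- import math
--
-- def cycle_to_oneline(cycles,n):
--     """
--     Convert a permutation in cycle notation to one-line notation.
--     Returns as a list of integers.
--
--     cycles: list of lists of integers
--     n: integer (length of permutation)
--     """
--     oneline = list(range(n))
--     for cycle in cycles:
--         k = len(cycle)
--         for i in range(k-1):
--             oneline[cycle[i]] = cycle[i+1]
--         oneline[cycle[k-1]] = cycle[0]
--     return oneline
--
-- def fundamental_group(triple,simplify=False):
--     """
--     Computes a finite presentation of the fundamental group of a 3-crystallisation specified by permutations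
--         id, mu = (0)(1 2 3)...(n-3 n-2 n-1) and two permutations sigma1, sigma2 with cycle type (1^1,3^{(n-1)/3}).
--     Input format is the output format of family_three_crystallisations(n, return_product=True).
--     Returns as a pair of lists (generators, relations).
--         Generators are strings of the form "x0", "x1", "x2", ...
--         Relations are lists of generators "xi" and their inverses "xi^-1".
--
--     Uses the standard procedure for crystallisation fundamental groups (as in Ferri et. al. 1986) restricted to this special case.
--     The generators represent (0,1)-coloured cycles, ordered by the corresponding cycles in mu and excluding the last.
--         In particular "x0" is the cycle (0,0') of length 2, and all other cycles are of length 6.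
--     The relations are obtained from (2,3)-coloured cycles, ordered by the corresponding cycles in sigma1^-1 * sigma2 and excluding the last.
--         In particular the first is from the cycle of length 2, so it has length at most 2 and all others have length at most 6.
--
--     triple: 3-tuple (sigma1, sigma2, sigma1^-1 * sigma2) of permutations in cycle notation (lists of lists of integers).
--     simplify: if true, cancel any occurences of "xi xi^-1" or "xi^-1 xi" from relations.
--     """
--     n = len(triple[0])*3-2
--     num_three_cycles = int((n-1)/3)
--     p2invp1_cycles = triple[2]
--     p2_oneline = cycle_to_oneline(triple[1],n)
--     generators = ["x{}".format(i) for i in range(num_three_cycles)]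
--     short_cycle_1 = p2invp1_cycles[0][0]
--     short_cycle_1_gen = math.ceil(short_cycle_1/3)
--     short_cycle_2 = p2_oneline[short_cycle_1]
--     short_cycle_2_gen = math.ceil(short_cycle_2/3)
--     short_relation = []
--     if simplify and short_cycle_1_gen == short_cycle_2_gen:
--         pass
--     else:
--         if short_cycle_1_gen < num_three_cycles:
--             short_relation.append("x{}".format(short_cycle_1_gen))
--         if short_cycle_2_gen < num_three_cycles:
--             short_relation.append("x{}^-1".format(short_cycle_2_gen))
--     relations = [short_relation]
--     for i in range(1,num_three_cycles):
--         relation = []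
--         for j in p2invp1_cycles[i]:
--             colour2_gen = math.ceil(j/3)
--             if colour2_gen < num_three_cycles:
--                 colour2_gen_string = "x{}".format(colour2_gen)
--                 if simplify:
--                     if relation != [] and relation[-1] == colour2_gen_string + "^-1":
--                         relation.pop()
--                     else:
--                         relation.append(colour2_gen_string)
--                 else:
--                     relation.append(colour2_gen_string)
--             colour3_gen = math.ceil(p2_oneline[j]/3)
--             if colour3_gen < num_three_cycles:
--                 colour3_gen_string = "x{}".format(colour3_gen)
--                 if simplify:
--                     if relation != [] and relation[-1] == colour3_gen_string:
--                         relation.pop()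
--                     else:
--                         relation.append(colour3_gen_string+"^-1")
--                 else:
--                     relation.append(colour3_gen_string+"^-1")
--         relations.append(relation)
--     return (generators,relations)
-- ===== SOURCE B (Python) =====
-- import math
--
-- def cycle_to_oneline(cycles, n):
--     oneline = list(range(n))
--     for cycle in cycles:
--         k = len(cycle)
--         for i in range(k-1):
--             oneline[cycle[i]] = cycle[i+1]
--         oneline[cycle[k-1]] = cycle[0]
--     return oneline
--
-- def fundamental_group(triple, simplify=False):
--     # Alternative decomposition: build every relation as a raw word of tagged
--     # tokens (generator index, sign) first, then (when simplify) apply one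
--     # stack-based free-reduction pass, and render strings only at the end.
--     n = len(triple[0])*3 - 2
--     num = int((n-1)/3)
--     p2 = cycle_to_oneline(triple[1], n)
--
--     def tokens(j):
--         out = []
--         g = math.ceil(j/3)
--         if g < num:
--             out.append((g, 0))
--         h = math.ceil(p2[j]/3)
--         if h < num:
--             out.append((h, 1))
--         return out
--
--     raws = [tokens(triple[2][0][0])]
--     raws += [[t for j in triple[2][i] for t in tokens(j)] for i in range(1, num)]
--
--     def reduce(word):
--         stack = []
--         for t in word:
--             if stack and stack[-1] == (t[0], 1 - t[1]):
--                 stack.pop()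
--             else:
--                 stack.append(t)
--         return stack
--
--     words = [reduce(w) for w in raws] if simplify else raws
--     relations = [["x{}".format(g) if s == 0 else "x{}^-1".format(g) for (g, s) in w]
--                  for w in words]
--     return (["x{}".format(i) for i in range(num)], relations)
-- ===== Notes on version B (the rewrite author's own statement) =====
-- stated objective: simpler
-- what changed: Instead of A's inline per-branch cancellation on rendered strings with a special-cased first short relation, B first builds every relation uniformly as a raw word of tagged (generator, sign) tokens, applies one stack-based free-reduction pass when simplify is set, and renders the strings only at the end.
import Mathlib
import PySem

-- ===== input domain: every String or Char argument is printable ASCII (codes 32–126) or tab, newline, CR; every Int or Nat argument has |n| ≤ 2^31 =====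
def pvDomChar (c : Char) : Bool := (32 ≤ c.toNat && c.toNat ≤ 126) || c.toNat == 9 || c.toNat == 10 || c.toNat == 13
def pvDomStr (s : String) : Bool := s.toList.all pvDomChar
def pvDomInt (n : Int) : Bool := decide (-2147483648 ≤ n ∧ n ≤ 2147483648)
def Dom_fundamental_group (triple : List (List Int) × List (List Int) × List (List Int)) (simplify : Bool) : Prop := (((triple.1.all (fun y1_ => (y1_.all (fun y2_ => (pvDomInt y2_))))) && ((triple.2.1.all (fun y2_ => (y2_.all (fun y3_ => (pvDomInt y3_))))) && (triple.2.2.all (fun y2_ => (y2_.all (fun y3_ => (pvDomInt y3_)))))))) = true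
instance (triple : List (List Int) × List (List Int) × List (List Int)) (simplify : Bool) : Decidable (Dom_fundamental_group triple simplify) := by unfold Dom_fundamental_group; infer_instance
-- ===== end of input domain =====

-- B builds each relation as a raw word of tagged tokens, free-reduces it in one stack pass when
-- simplify is set, and renders the strings only at the end (objective: simpler uniform decomposition).

-- shared helper of both Pythons: cycle_to_oneline (identical source in Source A and Source B)
def pvCycleToOneline (cycles : List (List Int)) (n : Int) : List Int :=
  cycles.foldl (fun oneline cycle =>
    let k : Int := cycle.length
    let oneline := (PySem.List.pyRange 0 (k - 1) 1).foldl (fun ol i =>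
      PySem.List.pySetD ol (PySem.List.pyGetD cycle i 0) (PySem.List.pyGetD cycle (i + 1) 0)) oneline
    PySem.List.pySetD oneline (PySem.List.pyGetD cycle (k - 1) 0) (PySem.List.pyGetD cycle 0 0))
    (PySem.List.pyRange 0 n 1)

-- math.ceil(j/3): exact ceiling division on the stated domain |j| ≤ 2^31 (there the float
-- division is accurate enough that ceil of it is the exact ceiling); used by both Pythons.
def pvCeil3 (j : Int) : Int := -(PySem.Int.floordiv (-j) 3)

-- ===== PORT A =====
-- the body of A's inner 'for j in p2invp1_cycles[i]' loop, step for step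
def pvABody (num : Int) (p2_oneline : List Int) (simplify : Bool) (relation : List String) (j : Int) : List String :=
  let colour2_gen := pvCeil3 j
  let relation :=
    if colour2_gen < num then
      let s := "x" ++ PySem.Int.toStr colour2_gen
      if simplify then
        (if (!relation.isEmpty) && (relation.getLast? == some (s ++ "^-1")) then relation.dropLast
         else relation ++ [s])
      else relation ++ [s]
    else relation
  let colour3_gen := pvCeil3 (PySem.List.pyGetD p2_oneline j 0)
  if colour3_gen < num then
    let s := "x" ++ PySem.Int.toStr colour3_gen
    if simplify then
      (if (!relation.isEmpty) && (relation.getLast? == some s) then relation.dropLast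
       else relation ++ [s ++ "^-1"])
    else relation ++ [s ++ "^-1"]
  else relation

def fundamental_group (triple : List (List Int) × List (List Int) × List (List Int)) (simplify : Bool) : List String × List (List String) :=
  let n : Int := (triple.1.length : Int) * 3 - 2
  -- int((n-1)/3): exact because 3 always divides n-1 here; truncdiv is int(a/b)
  let num : Int := PySem.Int.truncdiv (n - 1) 3
  let p2invp1_cycles := triple.2.2
  let p2_oneline := pvCycleToOneline triple.2.1 n
  let generators := (PySem.List.pyRange 0 num 1).map (fun i => "x" ++ PySem.Int.toStr i)
  let short_cycle_1 := PySem.List.pyGetD (PySem.List.pyGetD p2invp1_cycles 0 []) 0 0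
  let short_cycle_1_gen := pvCeil3 short_cycle_1
  let short_cycle_2 := PySem.List.pyGetD p2_oneline short_cycle_1 0
  let short_cycle_2_gen := pvCeil3 short_cycle_2
  let short_relation : List String :=
    if simplify && (short_cycle_1_gen == short_cycle_2_gen) then []
    else
      if short_cycle_2_gen < num then
        (if short_cycle_1_gen < num then [] ++ ["x" ++ PySem.Int.toStr short_cycle_1_gen] else []) ++
          ["x" ++ PySem.Int.toStr short_cycle_2_gen ++ "^-1"]
      else
        (if short_cycle_1_gen < num then [] ++ ["x" ++ PySem.Int.toStr short_cycle_1_gen] else [])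
  let relations := (PySem.List.pyRange 1 num 1).foldl (fun rels i =>
    rels ++ [(PySem.List.pyGetD p2invp1_cycles i []).foldl (pvABody num p2_oneline simplify) []])
    [short_relation]
  (generators, relations)

-- ===== PORT B =====
def pvTokens (num : Int) (p2 : List Int) (j : Int) : List (Int × Int) :=
  let g := pvCeil3 j
  let out := if g < num then [(g, (0 : Int))] else []
  let h := pvCeil3 (PySem.List.pyGetD p2 j 0)
  if h < num then out ++ [(h, (1 : Int))] else out

def pvReduce (word : List (Int × Int)) : List (Int × Int) :=
  word.foldl (fun stack t =>
    if (!stack.isEmpty) && (stack.getLast? == some (t.1, 1 - t.2)) then stack.dropLast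
    else stack ++ [t]) []

def pvRender (t : Int × Int) : String :=
  if t.2 == 0 then "x" ++ PySem.Int.toStr t.1 else "x" ++ PySem.Int.toStr t.1 ++ "^-1"

def fundamental_group_alt (triple : List (List Int) × List (List Int) × List (List Int)) (simplify : Bool) : List String × List (List String) :=
  let n : Int := (triple.1.length : Int) * 3 - 2
  let num : Int := PySem.Int.truncdiv (n - 1) 3
  let p2 := pvCycleToOneline triple.2.1 n
  let raws : List (List (Int × Int)) :=
    pvTokens num p2 (PySem.List.pyGetD (PySem.List.pyGetD triple.2.2 0 []) 0 0) ::
      (PySem.List.pyRange 1 num 1).map (fun i =>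
        (PySem.List.pyGetD triple.2.2 i []).flatMap (pvTokens num p2))
  let words := if simplify then raws.map pvReduce else raws
  ((PySem.List.pyRange 0 num 1).map (fun i => "x" ++ PySem.Int.toStr i),
   words.map (fun w => w.map pvRender))

-- ===== PRECONDITION & SPEC =====
-- Pre_ is exactly the inputs where the Python A returns: every cycle of sigma2 is nonempty with
-- entries that are valid (possibly negative) Python indices into the length-n one-line table, the
-- first cycle of sigma1^-1*sigma2 exists, is nonempty and its first entry is a valid index, there
-- are at least num_three_cycles cycles in sigma1^-1*sigma2, and the entries of cycles 1..num-1 are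
-- valid indices; everywhere else A raises IndexError.
def Pre_fundamental_group (triple : List (List Int) × List (List Int) × List (List Int)) (simplify : Bool) : Prop :=
  let L : Nat := ((triple.1.length : Int) * 3 - 2).toNat
  let num : Int := (triple.1.length : Int) - 1
  (∀ c ∈ triple.2.1, c ≠ [] ∧ ∀ e ∈ c, PySem.Raise.InRange L e) ∧
  triple.2.2 ≠ [] ∧
  PySem.List.pyGetD triple.2.2 0 [] ≠ [] ∧
  PySem.Raise.InRange L (PySem.List.pyGetD (PySem.List.pyGetD triple.2.2 0 []) 0 0) ∧
  num ≤ (triple.2.2.length : Int) ∧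
  (∀ i ∈ PySem.List.pyRange 1 num 1, ∀ j ∈ PySem.List.pyGetD triple.2.2 i [], PySem.Raise.InRange L j)
instance (triple : List (List Int) × List (List Int) × List (List Int)) (simplify : Bool) : Decidable (Pre_fundamental_group triple simplify) := by unfold Pre_fundamental_group; infer_instance

def pvWitness_fundamental_group : (List (List Int) × List (List Int) × List (List Int)) × Bool :=
  (([[0], [1, 2, 3]], [[0], [1, 2, 3]], [[0, 1], [2, 3]]), true)

def Spec_fundamental_group (triple : List (List Int) × List (List Int) × List (List Int)) (simplify : Bool) (out : List String × List (List String)) : Prop := out = fundamental_group_alt triple simplify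
instance (triple : List (List Int) × List (List Int) × List (List Int)) (simplify : Bool) (out : List String × List (List String)) : Decidable (Spec_fundamental_group triple simplify out) := by unfold Spec_fundamental_group; infer_instance

-- ===== CLAIM (what is proved, stated in full; the proofs are below) =====
def Claim_equal_fundamental_group : Prop := ∀ (triple : List (List Int) × List (List Int) × List (List Int)) (simplify : Bool), Dom_fundamental_group triple simplify → Pre_fundamental_group triple simplify → Spec_fundamental_group triple simplify (fundamental_group triple simplify)


-- ===== LEMMAS AND PROOFS =====


theorem pvDigitChar_inj (a b : Nat) (ha : a < 10) (hb : b < 10) (h : Nat.digitChar a = Nat.digitChar b) : a = b := by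
  interval_cases a <;> interval_cases b <;> simp_all [Nat.digitChar]

theorem pvToDigits_inj : ∀ a b : Nat, Nat.toDigits 10 a = Nat.toDigits 10 b → a = b := by
  intro a
  induction a using Nat.strong_induction_on with
  | _ a ih =>
    intro b h
    rw [Nat.toDigits_eq_if (n := a) (by norm_num), Nat.toDigits_eq_if (n := b) (by norm_num)] at h
    by_cases h1 : a < 10 <;> by_cases h2 : b < 10
    · rw [if_pos h1, if_pos h2] at h
      exact pvDigitChar_inj _ _ h1 h2 (List.singleton_inj.mp h)
    · rw [if_pos h1, if_neg h2] at h
      exfalso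
      have hl := congrArg List.length h
      simp only [List.length_append, List.length_cons, List.length_nil] at hl
      have := @Nat.length_toDigits_pos 10 (b / 10)
      omega
    · rw [if_neg h1, if_pos h2] at h
      exfalso
      have hl := congrArg List.length h
      simp only [List.length_append, List.length_cons, List.length_nil] at hl
      have := @Nat.length_toDigits_pos 10 (a / 10)
      omega
    · rw [if_neg h1, if_neg h2] at h
      obtain ⟨hpre, hsuf⟩ := List.append_inj' h (by simp)
      have hm : a % 10 = b % 10 :=
        pvDigitChar_inj _ _ (Nat.mod_lt _ (by norm_num)) (Nat.mod_lt _ (by norm_num))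
          (List.singleton_inj.mp hsuf)
      have hd : a / 10 = b / 10 := ih (a / 10) (Nat.div_lt_self (by omega) (by norm_num)) _ hpre
      omega

theorem pvToChars_inj (a b : Int) (h : PySem.Int.toChars a = PySem.Int.toChars b) : a = b := by
  unfold PySem.Int.toChars at h
  have hdig : ∀ (n : Nat) (rest : List Char), Nat.toDigits 10 n ≠ '-' :: rest := by
    intro n rest hc
    have : ('-' : Char) ∈ Nat.toDigits 10 n := by rw [hc]; exact List.mem_cons_self
    have := Nat.isDigit_of_mem_toDigits (by norm_num) (by norm_num) this
    simp [Char.isDigit] at this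
  split_ifs at h with ha hb hb
  · have := pvToDigits_inj _ _ (List.cons_injective h)
    omega
  · exact absurd h.symm (hdig _ _)
  · exact absurd h (hdig _ _)
  · have := pvToDigits_inj _ _ h
    omega

theorem pvCaret_not_mem (a : Int) : ('^' : Char) ∉ PySem.Int.toChars a := by
  intro hmem
  unfold PySem.Int.toChars at hmem
  split_ifs at hmem with ha
  · rcases List.mem_cons.mp hmem with h | h
    · simp at h
    · have := Nat.isDigit_of_mem_toDigits (by norm_num) (by norm_num) h
      simp [Char.isDigit] at this
  · have := Nat.isDigit_of_mem_toDigits (by norm_num) (by norm_num) hmem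
    simp [Char.isDigit] at this

theorem pvGenStr_inj (a b : Int) : ("x" ++ PySem.Int.toStr a = "x" ++ PySem.Int.toStr b) ↔ a = b := by
  constructor
  · intro h
    apply pvToChars_inj
    have := congrArg String.toList h
    simpa [String.toList_append, PySem.Int.toList_toStr] using this
  · intro h; rw [h]

theorem pvMixed_ne (a b : Int) : ("x" ++ PySem.Int.toStr a) ≠ ("x" ++ PySem.Int.toStr b ++ "^-1") := by
  intro h
  have := congrArg String.toList h
  simp [String.toList_append, PySem.Int.toList_toStr] at this
  exact pvCaret_not_mem a (by rw [this]; simp)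

theorem pvToStr_inj (a b : Int) : (PySem.Int.toStr a = PySem.Int.toStr b) ↔ a = b := by
  constructor
  · intro h
    exact (pvGenStr_inj a b).mp (by rw [h])
  · intro h; rw [h]

-- the single free-reduction step of B's stack pass, as a named function
def pvStep (stack : List (Int × Int)) (t : Int × Int) : List (Int × Int) :=
  if (!stack.isEmpty) && (stack.getLast? == some (t.1, 1 - t.2)) then stack.dropLast
  else stack ++ [t]

theorem pvReduce_eq_foldl (w : List (Int × Int)) : pvReduce w = w.foldl pvStep [] := rfl

def pvTagOK (st : List (Int × Int)) : Prop := ∀ u ∈ st, u.2 = 0 ∨ u.2 = 1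

theorem pvRender_inj (t u : Int × Int) (ht : t.2 = 0 ∨ t.2 = 1) (hu : u.2 = 0 ∨ u.2 = 1) :
    pvRender t = pvRender u ↔ t = u := by
  obtain ⟨t1, t2⟩ := t
  obtain ⟨u1, u2⟩ := u
  simp only at ht hu
  unfold pvRender
  rcases ht with ht | ht <;> rcases hu with hu | hu <;> subst ht <;> subst hu <;>
    simp [pvToStr_inj, pvMixed_ne, (pvMixed_ne u1 t1).symm, Prod.ext_iff]

theorem pvStep_tag (st : List (Int × Int)) (t : Int × Int) (hst : pvTagOK st)
    (ht : t.2 = 0 ∨ t.2 = 1) : pvTagOK (pvStep st t) := by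
  unfold pvStep
  split
  · exact fun u hu => hst u (List.dropLast_subset _ hu)
  · intro u hu
    rcases List.mem_append.mp hu with h | h
    · exact hst u h
    · simp at h; subst h; exact ht

theorem pvFoldl_step_tag (w : List (Int × Int)) : ∀ st : List (Int × Int), pvTagOK st → pvTagOK w → pvTagOK (w.foldl pvStep st) := by
  induction w with
  | nil => exact fun st hst _ => hst
  | cons t w ih =>
    intro st hst hw
    exact ih _ (pvStep_tag st t hst (hw t List.mem_cons_self)) (fun u hu => hw u (List.mem_cons_of_mem _ hu))

theorem pvTokens_tag (num : Int) (p2 : List Int) (j : Int) : pvTagOK (pvTokens num p2 j) := by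
  intro u hu
  simp only [pvTokens] at hu
  split_ifs at hu <;> simp at hu <;> rcases hu with h | h <;> simp_all

theorem pvStep_sim (st : List (Int × Int)) (t : Int × Int) (hst : pvTagOK st)
    (ht : t.2 = 0 ∨ t.2 = 1) :
    (if (!(st.map pvRender).isEmpty) && ((st.map pvRender).getLast? == some (pvRender (t.1, 1 - t.2)))
     then (st.map pvRender).dropLast else (st.map pvRender) ++ [pvRender t])
    = (pvStep st t).map pvRender := by
  unfold pvStep
  rw [List.getLast?_map, ← List.map_dropLast, List.isEmpty_map]
  cases hlast : st.getLast? with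
  | none => simp
  | some u =>
    have hu : u.2 = 0 ∨ u.2 = 1 := hst u (List.mem_of_getLast? hlast)
    have htag : (t.1, 1 - t.2).2 = 0 ∨ (t.1, 1 - t.2).2 = 1 := by
      rcases ht with h | h <;> simp [h]
    have hcond : (pvRender u == pvRender (t.1, 1 - t.2)) = (u == (t.1, 1 - t.2)) := by
      by_cases h : u = (t.1, 1 - t.2)
      · simp [h]
      · simp [h, (pvRender_inj u (t.1, 1 - t.2) hu htag).not.mpr h]
    have hs : (some (pvRender u) == some (pvRender (t.1, 1 - t.2))) = (some u == some (t.1, 1 - t.2)) := by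
      simpa using hcond
    simp only [Option.map_some]
    simp only [hs]
    split
    · rfl
    · simp

theorem pvStepPlain_sim (st : List (Int × Int)) (hst : pvTagOK st) (g : Int) :
    (if (!(st.map pvRender).isEmpty) && ((st.map pvRender).getLast? == some ("x" ++ PySem.Int.toStr g ++ "^-1"))
     then (st.map pvRender).dropLast else (st.map pvRender) ++ ["x" ++ PySem.Int.toStr g])
    = (pvStep st (g, 0)).map pvRender := by
  have h := pvStep_sim st (g, 0) hst (Or.inl rfl)
  simpa [pvRender] using h

theorem pvStepInv_sim (st : List (Int × Int)) (hst : pvTagOK st) (g : Int) :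
    (if (!(st.map pvRender).isEmpty) && ((st.map pvRender).getLast? == some ("x" ++ PySem.Int.toStr g))
     then (st.map pvRender).dropLast else (st.map pvRender) ++ ["x" ++ PySem.Int.toStr g ++ "^-1"])
    = (pvStep st (g, 1)).map pvRender := by
  have h := pvStep_sim st (g, 1) hst (Or.inr rfl)
  simpa [pvRender] using h

theorem pvABody_simp_sim (num : Int) (p2 : List Int) (st : List (Int × Int)) (hst : pvTagOK st)
    (j : Int) :
    pvABody num p2 true (st.map pvRender) j
      = (List.foldl pvStep st (pvTokens num p2 j)).map pvRender := by
  unfold pvABody pvTokens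
  simp only [if_true]
  by_cases hg : pvCeil3 j < num <;> by_cases hh : pvCeil3 (PySem.List.pyGetD p2 j 0) < num <;>
    simp only [hg, hh, if_pos, if_neg, not_false_iff]
  · rw [pvStepPlain_sim st hst (pvCeil3 j)]
    rw [pvStepInv_sim _ (pvStep_tag st _ hst (Or.inl rfl)) (pvCeil3 (PySem.List.pyGetD p2 j 0))]
    simp [List.foldl]
  · rw [pvStepPlain_sim st hst (pvCeil3 j)]
    simp [List.foldl]
  · rw [pvStepInv_sim st hst (pvCeil3 (PySem.List.pyGetD p2 j 0))]
    simp [List.foldl]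
  · simp [List.foldl]

theorem pvABody_raw (num : Int) (p2 : List Int) (rel : List String) (j : Int) :
    pvABody num p2 false rel j = rel ++ (pvTokens num p2 j).map pvRender := by
  unfold pvABody pvTokens
  by_cases hg : pvCeil3 j < num <;> by_cases hh : pvCeil3 (PySem.List.pyGetD p2 j 0) < num <;>
    simp [hg, hh, pvRender]

theorem pvARel_simp (num : Int) (p2 : List Int) (cyc : List Int) (st : List (Int × Int))
    (hst : pvTagOK st) :
    cyc.foldl (pvABody num p2 true) (st.map pvRender)
      = (List.foldl pvStep st (cyc.flatMap (pvTokens num p2))).map pvRender := by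
  induction cyc generalizing st with
  | nil => rfl
  | cons j cyc ih =>
    rw [List.foldl_cons, pvABody_simp_sim num p2 st hst j,
        ih _ (pvFoldl_step_tag _ st hst (pvTokens_tag num p2 j)),
        List.flatMap_cons, List.foldl_append]

theorem pvARel_raw (num : Int) (p2 : List Int) (cyc : List Int) (acc : List String) :
    cyc.foldl (pvABody num p2 false) acc = acc ++ (cyc.flatMap (pvTokens num p2)).map pvRender := by
  induction cyc generalizing acc with
  | nil => simp
  | cons j cyc ih =>
    rw [List.foldl_cons, pvABody_raw, ih, List.flatMap_cons, List.map_append, List.append_assoc]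

theorem pvShort_raw (num : Int) (p2 : List Int) (sc1 : Int) :
    (if pvCeil3 (PySem.List.pyGetD p2 sc1 0) < num then
       (if pvCeil3 sc1 < num then [] ++ ["x" ++ PySem.Int.toStr (pvCeil3 sc1)] else []) ++
         ["x" ++ PySem.Int.toStr (pvCeil3 (PySem.List.pyGetD p2 sc1 0)) ++ "^-1"]
     else
       (if pvCeil3 sc1 < num then [] ++ ["x" ++ PySem.Int.toStr (pvCeil3 sc1)] else []))
    = (pvTokens num p2 sc1).map pvRender := by
  unfold pvTokens
  by_cases hg : pvCeil3 sc1 < num <;> by_cases hh : pvCeil3 (PySem.List.pyGetD p2 sc1 0) < num <;>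
    simp [hg, hh, pvRender]

theorem pvShort_simp (num : Int) (p2 : List Int) (sc1 : Int) :
    (if pvCeil3 sc1 == pvCeil3 (PySem.List.pyGetD p2 sc1 0) then []
     else
       if pvCeil3 (PySem.List.pyGetD p2 sc1 0) < num then
         (if pvCeil3 sc1 < num then [] ++ ["x" ++ PySem.Int.toStr (pvCeil3 sc1)] else []) ++
           ["x" ++ PySem.Int.toStr (pvCeil3 (PySem.List.pyGetD p2 sc1 0)) ++ "^-1"]
       else
         (if pvCeil3 sc1 < num then [] ++ ["x" ++ PySem.Int.toStr (pvCeil3 sc1)] else []))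
    = (pvReduce (pvTokens num p2 sc1)).map pvRender := by
  rw [pvReduce_eq_foldl]
  unfold pvTokens
  by_cases heq : pvCeil3 sc1 = pvCeil3 (PySem.List.pyGetD p2 sc1 0)
  · rw [← heq]
    by_cases hg : pvCeil3 sc1 < num <;> simp [hg, List.foldl, pvStep]
  · have hne : (pvCeil3 sc1 == pvCeil3 (PySem.List.pyGetD p2 sc1 0)) = false := by
      simp [heq]
    by_cases hg : pvCeil3 sc1 < num <;> by_cases hh : pvCeil3 (PySem.List.pyGetD p2 sc1 0) < num <;>
      simp [hne, hg, hh, List.foldl, pvStep, pvRender, Prod.ext_iff, heq]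

theorem fundamental_group_spec : Claim_equal_fundamental_group := by
  intro triple simplify _hdom _hpre
  unfold Spec_fundamental_group
  cases simplify
  · simp only [fundamental_group, fundamental_group_alt, Bool.false_and, if_false,
      Bool.false_eq_true]
    rw [PySem.List.foldl_append_singleton_eq_map]
    refine congrArg₂ Prod.mk rfl ?_
    rw [List.singleton_append]
    refine congrArg₂ List.cons ?_ ?_
    · exact pvShort_raw _ _ _
    · rw [List.map_map]
      refine List.map_congr_left fun i _ => ?_
      exact pvARel_raw _ _ _ []
  · simp only [fundamental_group, fundamental_group_alt, Bool.true_and, if_true]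
    rw [PySem.List.foldl_append_singleton_eq_map]
    refine congrArg₂ Prod.mk rfl ?_
    rw [List.singleton_append]
    simp only [List.map_cons, List.map_map]
    refine congrArg₂ List.cons ?_ ?_
    · exact pvShort_simp _ _ _
    · refine List.map_congr_left fun i _ => ?_
      have h := pvARel_simp (PySem.Int.truncdiv ((triple.1.length : Int) * 3 - 2 - 1) 3)
        (pvCycleToOneline triple.2.1 ((triple.1.length : Int) * 3 - 2))
        (PySem.List.pyGetD triple.2.2 i []) [] (by intro u hu; cases hu)
      simpa [pvReduce_eq_foldl, Function.comp] using h
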